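-- pv_equiv track=rewrite | github.com/Malpertui/100-Days-of-Code | blackjack.py | get_new_cards_list
-- ===== SOURCE A (Python) =====
-- def get_new_cards_list(cards_list):
--     cards_score = 0
--     for i in cards_list:
--         cards_score += i
--     for i in range(len(cards_list)):
--         if cards_score > 21 and cards_list[i] == 11:
--             cards_list[i] = 1
--             cards_score -= 10
--     return cards_list
-- ===== SOURCE B (Python) =====
-- def get_new_cards_list(cards_list):
--     total = sum(cards_list)
--     if total <= 21:
--         return cards_list
--     # closed-form number of aces to demote: enough 10-steps to reach <= 21, capped by ace count
--     k = min(cards_list.count(11), -(-(total - 21) // 10))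
--     for idx, v in enumerate(cards_list):
--         if k == 0:
--             break
--         if v == 11:
--             cards_list[idx] = 1
--             k -= 1
--     return cards_list
-- ===== Notes on version B (the rewrite author's own statement) =====
-- stated objective: alternative
-- what changed: Replaces the per-element running-score re-check by a closed-form computation of how many aces to demote (min of ace count and ceil((total-21)/10)) followed by a single targeted pass that rewrites the first k elevens and stops early.
import Mathlib
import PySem

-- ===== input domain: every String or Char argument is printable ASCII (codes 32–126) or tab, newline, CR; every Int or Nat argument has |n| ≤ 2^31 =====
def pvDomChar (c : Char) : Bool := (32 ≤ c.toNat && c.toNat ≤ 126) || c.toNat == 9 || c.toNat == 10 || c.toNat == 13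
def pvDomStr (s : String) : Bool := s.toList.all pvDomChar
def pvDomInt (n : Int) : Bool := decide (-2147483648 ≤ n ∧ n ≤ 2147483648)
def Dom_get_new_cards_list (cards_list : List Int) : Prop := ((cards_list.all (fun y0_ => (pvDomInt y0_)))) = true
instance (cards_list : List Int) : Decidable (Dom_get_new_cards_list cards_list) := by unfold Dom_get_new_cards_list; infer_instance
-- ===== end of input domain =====

-- B replaces A's per-element running-score check by a closed-form demotion count plus one
-- targeted pass; equivalence is about the returned value (both Pythons mutate the list in place).

-- ===== PORT A =====
-- A's second loop reads/writes cards_list[i] left to right over range(len(cards_list));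
-- since each index is visited once, in order, and always in range, this is exactly the
-- structural left-to-right recursion below carrying the running score (exact hand port).
def pvLoopA (cards_list : List Int) (cards_score : Int) : List Int :=
  match cards_list with
  | [] => []
  | x :: xs =>
    if cards_score > 21 ∧ x = 11 then 1 :: pvLoopA xs (cards_score - 10)
    else x :: pvLoopA xs cards_score

def get_new_cards_list (cards_list : List Int) : List Int :=
  let cards_score := cards_list.foldl (fun s i => s + i) 0
  pvLoopA cards_list cards_score

-- ===== PORT B =====
-- the single pass: rewrite the first k elevens to 1, stop when k hits 0
def pvDemote (cards_list : List Int) (k : Int) : List Int :=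
  if k = 0 then cards_list
  else
    match cards_list with
    | [] => []
    | x :: xs => if x = 11 then 1 :: pvDemote xs (k - 1) else x :: pvDemote xs k

def get_new_cards_list_alt (cards_list : List Int) : List Int :=
  let total := cards_list.sum
  if total ≤ 21 then cards_list
  else
    let k := min ((cards_list.count 11 : Int)) (-(PySem.Int.floordiv (-(total - 21)) 10))
    pvDemote cards_list k

-- ===== PRECONDITION & SPEC =====
def Spec_get_new_cards_list (cards_list : List Int) (out : List Int) : Prop := out = get_new_cards_list_alt cards_list
instance (cards_list : List Int) (out : List Int) : Decidable (Spec_get_new_cards_list cards_list out) := by unfold Spec_get_new_cards_list; infer_instance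

-- ===== CLAIM (what is proved, stated in full; the proofs are below) =====
def Claim_equal_get_new_cards_list : Prop := ∀ (cards_list : List Int), Dom_get_new_cards_list cards_list → Spec_get_new_cards_list cards_list (get_new_cards_list cards_list)

-- ===== LEMMAS AND PROOFS =====

-- number of demotions A performs starting from score s: max 0 ⌈(s-21)/10⌉, as an Int
def pvNeed (s : Int) : Int := max 0 (-(PySem.Int.floordiv (-(s - 21)) 10))

theorem pvNeed_nonpos (s : Int) (h : s ≤ 21) : pvNeed s = 0 := by
  unfold pvNeed
  have h0 : (0:Int) ≤ PySem.Int.floordiv (-(s - 21)) 10 :=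
    (PySem.Int.le_floordiv_iff_mul_le (a := -(s - 21)) (b := 10) (q := 0) (by norm_num)).mpr
      (by nlinarith)
  omega

theorem pvNeed_pos (s : Int) (h : s > 21) : 1 ≤ pvNeed s ∧ pvNeed (s - 10) = pvNeed s - 1 := by
  unfold pvNeed
  have h10 : (0:Int) < 10 := by norm_num
  set q := -(PySem.Int.floordiv (-(s - 21)) 10) with hq
  have hb : (q - 1) * 10 < s - 21 ∧ s - 21 ≤ q * 10 :=
    (PySem.Int.neg_floordiv_neg_eq_iff_of_pos (a := s - 21) (b := 10) (q := q) h10).mp hq.symm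
  have hq1 : 1 ≤ q := by nlinarith
  have hb' : ((q - 1) - 1) * 10 < (s - 10) - 21 ∧ (s - 10) - 21 ≤ (q - 1) * 10 := by
    constructor <;> nlinarith
  have : -(PySem.Int.floordiv (-((s - 10) - 21)) 10) = q - 1 :=
    (PySem.Int.neg_floordiv_neg_eq_iff_of_pos (a := (s - 10) - 21) (b := 10) (q := q - 1) h10).mpr hb'
  rw [this]
  omega

theorem pvDemote_zero (xs : List Int) : pvDemote xs 0 = xs := by
  unfold pvDemote; simp

theorem pvDemote_cons (x : Int) (xs : List Int) (k : Int) (hk : k ≠ 0) :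
    pvDemote (x :: xs) k = if x = 11 then 1 :: pvDemote xs (k - 1) else x :: pvDemote xs k := by
  conv_lhs => rw [pvDemote]
  rw [if_neg hk]

-- main loop invariant: A's demotion loop equals the targeted pass with the closed-form count
theorem pvLoopA_eq (xs : List Int) (s : Int) :
    pvLoopA xs s = pvDemote xs (min ((xs.count 11 : Int)) (pvNeed s)) := by
  induction xs generalizing s with
  | nil => simp [pvLoopA, pvDemote]
  | cons x xs ih =>
    by_cases hs : s > 21
    · by_cases hx : x = 11
      · obtain ⟨h1, h2⟩ := pvNeed_pos s hs
        have hc : ((x::xs).count 11 : Int) = (xs.count 11 : Int) + 1 := by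
          simp [hx]
        have hmin1 : 1 ≤ min (((x::xs).count 11 : Int)) (pvNeed s) := by
          rw [hc]; omega
        rw [pvLoopA, if_pos ⟨hs, hx⟩, ih (s - 10), h2,
          pvDemote_cons x xs _ (by omega), if_pos hx]
        congr 2
        rw [hc]; omega
      · have hc : ((x::xs).count 11 : Int) = (xs.count 11 : Int) := by
          simp [hx]
        rw [pvLoopA, if_neg (by tauto), ih s, hc]
        by_cases hm : min ((xs.count 11 : Int)) (pvNeed s) = 0
        · rw [hm, pvDemote_zero, pvDemote_zero]
        · rw [pvDemote_cons x xs _ hm, if_neg hx]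
    · rw [pvNeed_nonpos s (by omega)]
      have : min (((x::xs).count 11 : Int)) 0 = 0 := by
        have : (0:Int) ≤ ((x::xs).count 11 : Int) := by positivity
        omega
      rw [this, pvDemote_zero, pvLoopA, if_neg (by tauto), ih s,
        pvNeed_nonpos s (by omega)]
      have : min ((xs.count 11 : Int)) 0 = 0 := by
        have : (0:Int) ≤ ((xs.count 11 : Int)) := by positivity
        omega
      rw [this, pvDemote_zero]

theorem pvFoldl_sum_aux (xs : List Int) (a : Int) :
    xs.foldl (fun s i => s + i) a = a + xs.sum := by
  induction xs generalizing a with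
  | nil => simp
  | cons x xs ih => simp [List.foldl, ih, List.sum_cons]; ring

theorem pvFoldl_sum (xs : List Int) : xs.foldl (fun s i => s + i) 0 = xs.sum := by
  rw [pvFoldl_sum_aux]; ring

-- ===== VERDICT (by name: the statement is the Claim_ definition above) =====
theorem get_new_cards_list_spec : Claim_equal_get_new_cards_list := by
  intro cards_list _
  unfold Spec_get_new_cards_list get_new_cards_list get_new_cards_list_alt
  simp only [pvFoldl_sum]
  by_cases h : cards_list.sum ≤ 21
  · rw [if_pos h, pvLoopA_eq, pvNeed_nonpos _ h]
    have : (0:Int) ≤ ((cards_list.count 11 : Int)) := by positivity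
    rw [show min ((cards_list.count 11 : Int)) 0 = 0 by omega, pvDemote_zero]
  · rw [if_neg h, pvLoopA_eq]
    congr 1
    unfold pvNeed
    have hpos := (pvNeed_pos cards_list.sum (by omega)).1
    unfold pvNeed at hpos
    omega
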